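-- pv_equiv track=rewrite | github.com/ZeroLoss-Lab/HACHIMI | analyse_all.py | is_valid_agent_name
-- ===== SOURCE A (Python) =====
-- def _count_syllables_concat(token: str) -> int:
--     if not isinstance(token, str) or not token:
--         return 0
--     i, n, cnt = 0, len(token), 0
--     while i < n:
--         j = i
--         while j < n and 'a' <= token[j] <= 'z':
--             j += 1
--         if j == i or j >= n or token[j] not in "12345":
--             return 0
--         cnt += 1
--         i = j + 1
--     return cnt
--
-- def is_valid_agent_name(name: str) -> bool:
--     if not isinstance(name, str):
--         return False
--     if "_" not in name:
--         return False
--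
--     parts = name.split("_")
--     if any(p == "" for p in parts):
--         return False
--
--     syllables_per_part = []
--     for p in parts:
--         syl = _count_syllables_concat(p)
--         if syl <= 0:
--             return False
--         syllables_per_part.append(syl)
--
--     total_syllables = sum(syllables_per_part)
--     if total_syllables < 2 or total_syllables > 4:
--         return False
--
--     if len(parts) == 2:
--         syl_surname = syllables_per_part[0]
--         syl_given = syllables_per_part[1]
--         if 1 <= syl_surname <= 2 and 1 <= syl_given <= 3 and syl_surname + syl_given <= 4:
--             return True
--         return False
--
--     syl_surname = syllables_per_part[0]
--     syl_given = total_syllables - syl_surname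
--
--     if syl_surname < 1 or syl_surname > 2:
--         return False
--     if syl_given < 1 or syl_given > 3:
--         return False
--
--     return True
-- ===== SOURCE B (Python) =====
-- def _part_ok(p: str) -> bool:
--     # a part is valid iff it matches (letters+ digit1-5)+ :
--     # non-empty, starts with a non-digit, ends with a digit, every char is a
--     # lowercase letter or a digit 1-5, and every digit is preceded by a letter.
--     if not p or p[0] in "12345" or p[-1] not in "12345":
--         return False
--     if not all('a' <= c <= 'z' or c in "12345" for c in p):
--         return False
--     return all('a' <= prev <= 'z' for prev, c in zip(p, p[1:]) if c in "12345")
--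
-- def is_valid_agent_name(name: str) -> bool:
--     if not isinstance(name, str) or "_" not in name:
--         return False
--     parts = name.split("_")
--     if not all(_part_ok(p) for p in parts):
--         return False
--     counts = [sum(c in "12345" for c in p) for p in parts]
--     total = sum(counts)
--     return 2 <= total <= 4 and 1 <= counts[0] <= 2 and 1 <= total - counts[0] <= 3
-- ===== Notes on version B (the rewrite author's own statement) =====
-- stated objective: idiomatic
-- what changed: Replaces the hand-written two-level index/while state machine and the duplicated two-part branch by a declarative per-part validity test (local character-class and adjacency conditions via zip) with the syllable count obtained as a plain digit count, and one uniform surname/given rule.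
import Mathlib
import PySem

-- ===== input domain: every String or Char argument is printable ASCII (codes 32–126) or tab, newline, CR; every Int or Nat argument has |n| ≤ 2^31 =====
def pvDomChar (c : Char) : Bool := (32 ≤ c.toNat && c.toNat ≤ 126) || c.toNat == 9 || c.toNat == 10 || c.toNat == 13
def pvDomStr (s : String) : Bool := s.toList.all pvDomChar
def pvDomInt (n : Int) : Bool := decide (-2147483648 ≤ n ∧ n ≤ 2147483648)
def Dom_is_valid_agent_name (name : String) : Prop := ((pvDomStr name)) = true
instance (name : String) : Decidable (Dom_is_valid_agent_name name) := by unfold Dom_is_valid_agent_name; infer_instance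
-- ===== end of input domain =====

-- B replaces A's hand-written per-character state machine and duplicated two-part branch by a
-- declarative per-token validity test plus a digit count, with one uniform surname/given rule (idiomatic).


-- ===== PORT A =====
-- inner while of `_count_syllables_concat`: scans the run of lowercase letters;
-- first component = the run scanned (its length is Python's `j - i`), second = the suffix from `j` on.
def pvSpanLetters : List Char → List Char × List Char
  | [] => ([], [])
  | c :: cs =>
    if 'a' ≤ c && c ≤ 'z' then
      let (t, r) := pvSpanLetters cs
      (c :: t, r)
    else ([], c :: cs)

-- termination fact for the outer while loop below
theorem pvSpanLetters_snd_length_le (cs : List Char) : (pvSpanLetters cs).2.length ≤ cs.length := by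
  induction cs with
  | nil => simp [pvSpanLetters]
  | cons c cs ih =>
    simp only [pvSpanLetters]
    split
    · simpa using Nat.le_succ_of_le ih
    · simp

-- outer `while i < n` of `_count_syllables_concat`; the list is the suffix of the token from `i`
def pvCountLoopA (cs : List Char) (cnt : Int) : Int :=
  if cs = [] then cnt
  else
    let t := (pvSpanLetters cs).1
    let rest := (pvSpanLetters cs).2
    if t = [] then 0                                 -- j == i
    else if hr : rest = [] then 0                    -- j >= n
    else if rest.head hr ∈ ['1', '2', '3', '4', '5']
    then pvCountLoopA rest.tail (cnt + 1)            -- cnt += 1; i = j + 1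
    else 0                                           -- token[j] not in "12345"
termination_by cs.length
decreasing_by
  have h := pvSpanLetters_snd_length_le cs
  cases hrest : (pvSpanLetters cs).2 with
  | nil => exact absurd hrest hr
  | cons a b =>
    rw [hrest] at h
    simp at h ⊢
    omega

def pvCountSyllablesConcat (token : List Char) : Int :=
  if token = [] then 0 else pvCountLoopA token 0

-- the per-part loop of `is_valid_agent_name`, with its early `return False` as `none`
def pvCollectA : List (List Char) → Option (List Int)
  | [] => some []
  | p :: ps =>
    let syl := pvCountSyllablesConcat p
    if syl ≤ 0 then none
    else (pvCollectA ps).map (syl :: ·)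

def is_valid_agent_name (name : String) : Bool :=
  let cs := name.toList
  if ¬ PySem.Chars.isIn ['_'] cs then false
  else
    let parts := PySem.Chars.splitOn cs ['_']
    if parts.any (· = []) then false
    else
      match pvCollectA parts with
      | none => false
      | some sylList =>
        let total := sylList.sum
        if total < 2 ∨ total > 4 then false
        else if parts.length = 2 then
          let s := sylList.getD 0 0
          let g := sylList.getD 1 0
          if 1 ≤ s ∧ s ≤ 2 ∧ 1 ≤ g ∧ g ≤ 3 ∧ s + g ≤ 4 then true else false
        else
          let s := sylList.getD 0 0
          let g := total - s
          if s < 1 ∨ s > 2 then false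
          else if g < 1 ∨ g > 3 then false
          else true

-- ===== PORT B =====
def pvLetter (c : Char) : Bool := 'a' ≤ c && c ≤ 'z'
def pvDig (c : Char) : Bool := c ∈ ['1', '2', '3', '4', '5']

-- `_part_ok`: non-empty, first char not a digit, last char a digit, every char a
-- letter or digit, every digit preceded by a letter (checked via zip p p[1:])
def pvPartOk : List Char → Bool
  | [] => false
  | c0 :: rest =>
    !pvDig c0 && pvDig (rest.getLast?.getD c0) &&
    (c0 :: rest).all (fun c => pvLetter c || pvDig c) &&
    ((c0 :: rest).zip rest).all (fun pc => !pvDig pc.2 || pvLetter pc.1)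

def is_valid_agent_name_alt (name : String) : Bool :=
  let cs := name.toList
  if ¬ PySem.Chars.isIn ['_'] cs then false
  else
    let parts := PySem.Chars.splitOn cs ['_']
    if ¬ parts.all pvPartOk then false
    else
      let counts := parts.map (fun p => (p.countP pvDig : Int))
      let total := counts.sum
      decide (2 ≤ total ∧ total ≤ 4 ∧
        1 ≤ counts.headD 0 ∧ counts.headD 0 ≤ 2 ∧
        1 ≤ total - counts.headD 0 ∧ total - counts.headD 0 ≤ 3)

-- ===== PRECONDITION & SPEC =====
def Spec_is_valid_agent_name (name : String) (out : Bool) : Prop := out = is_valid_agent_name_alt name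
instance (name : String) (out : Bool) : Decidable (Spec_is_valid_agent_name name out) := by unfold Spec_is_valid_agent_name; infer_instance

-- ===== CLAIM =====
def Claim_equal_is_valid_agent_name : Prop := ∀ (name : String), Dom_is_valid_agent_name name → Spec_is_valid_agent_name name (is_valid_agent_name name)

-- ===== LEMMAS AND PROOFS =====

theorem pvSpan_append (cs : List Char) : (pvSpanLetters cs).1 ++ (pvSpanLetters cs).2 = cs := by
  induction cs with
  | nil => simp [pvSpanLetters]
  | cons c cs ih =>
    simp only [pvSpanLetters]
    split
    · simpa using ih
    · simp

theorem pvSpan_letters (cs : List Char) : ∀ c ∈ (pvSpanLetters cs).1, pvLetter c = true := by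
  induction cs with
  | nil => simp [pvSpanLetters]
  | cons c cs ih =>
    simp only [pvSpanLetters]
    split
    · rename_i h
      intro x hx
      simp at hx
      rcases hx with h1 | h2
      · subst h1; simpa [pvLetter] using h
      · exact ih x h2
    · simp

theorem pvSpan_head_not_letter (cs : List Char) (c : Char) (r : List Char)
    (h : (pvSpanLetters cs).2 = c :: r) : pvLetter c = false := by
  induction cs with
  | nil => simp [pvSpanLetters] at h
  | cons a cs ih =>
    simp only [pvSpanLetters] at h
    split at h
    · exact ih (by simpa using h)
    · rename_i hl
      simp at h
      rw [← h.1]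
      simpa [pvLetter] using hl

theorem pvLetter_not_dig (c : Char) (h : pvLetter c = true) : pvDig c = false := by
  simp [pvLetter] at h
  simp [pvDig]
  refine ⟨?_, ?_, ?_, ?_, ?_⟩ <;> · rintro rfl; revert h; decide

theorem pvDig_not_letter (c : Char) (h : pvDig c = true) : pvLetter c = false := by
  cases hl : pvLetter c with
  | false => rfl
  | true => rw [pvLetter_not_dig c hl] at h; exact absurd h (by simp)

theorem pvLastD_cons (xs : List Char) (x l : Char) : (x :: xs).getLast?.getD l = xs.getLast?.getD x := by
  induction xs generalizing x l with
  | nil => simp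
  | cons b t ih =>
    rw [List.getLast?_cons_cons, ih b l, ← ih b x]

theorem pvLast_mem (rest : List Char) (c0 : Char) : rest.getLast?.getD c0 ∈ c0 :: rest := by
  induction rest generalizing c0 with
  | nil => simp
  | cons a r ih =>
    rw [pvLastD_cons]
    have := ih a
    simp at this ⊢
    tauto

theorem pvPartOk_false_of_bad (p : List Char) (c : Char) (hc : c ∈ p)
    (h1 : pvLetter c = false) (h2 : pvDig c = false) : pvPartOk p = false := by
  cases p with
  | nil => rfl
  | cons c0 rest =>
    cases hok : pvPartOk (c0 :: rest) with
    | false => rfl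
    | true =>
      exfalso
      unfold pvPartOk at hok
      simp only [Bool.and_eq_true] at hok
      have := List.all_eq_true.mp hok.1.2 c hc
      simp [h1, h2] at this

theorem pvPartOk_false_head (c : Char) (xs : List Char) (h : pvLetter c = false) :
    pvPartOk (c :: xs) = false := by
  cases hd : pvDig c with
  | true => simp [pvPartOk, hd]
  | false => exact pvPartOk_false_of_bad _ c (by simp) h hd

theorem pvPartOk_false_all_letters (p : List Char) (h : ∀ c ∈ p, pvLetter c = true) :
    pvPartOk p = false := by
  cases p with
  | nil => rfl
  | cons c0 rest =>
    have hd := pvLetter_not_dig _ (h _ (pvLast_mem rest c0))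
    cases hok : pvPartOk (c0 :: rest) with
    | false => rfl
    | true =>
      exfalso
      unfold pvPartOk at hok
      simp only [Bool.and_eq_true] at hok
      exact absurd hok.1.1.2 (by simp [hd])

theorem pvPartOk_cons_letter (l x : Char) (xs : List Char)
    (hl : pvLetter l = true) (hx : pvLetter x = true) :
    pvPartOk (l :: x :: xs) = pvPartOk (x :: xs) := by
  simp [pvPartOk, hl, hx, pvLetter_not_dig _ hl, pvLetter_not_dig _ hx, Bool.and_assoc,
    pvLastD_cons]

theorem pvPartOk_letter_digit (l c : Char) (rest : List Char)
    (hl : pvLetter l = true) (hc : pvDig c = true) :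
    pvPartOk (l :: c :: rest) = (rest.isEmpty || pvPartOk rest) := by
  cases rest with
  | nil => simp [pvPartOk, hl, hc, pvLetter_not_dig _ hl]
  | cons d r =>
    apply Bool.eq_iff_iff.mpr
    simp [pvPartOk, hl, hc, pvLetter_not_dig _ hl, pvDig_not_letter _ hc, pvLastD_cons]
    tauto

theorem pvPartOk_span_digit (t : List Char) (c : Char) (rest : List Char)
    (htne : t ≠ []) (ht : ∀ a ∈ t, pvLetter a = true) (hc : pvDig c = true) :
    pvPartOk (t ++ c :: rest) = (rest.isEmpty || pvPartOk rest) := by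
  induction t with
  | nil => simp at htne
  | cons a t ih =>
    cases t with
    | nil => simpa using pvPartOk_letter_digit a c rest (ht a (by simp)) hc
    | cons b t' =>
      have hb : pvLetter b = true := ht b (by simp)
      rw [List.cons_append, List.cons_append, pvPartOk_cons_letter a b _ (ht a (by simp)) hb]
      simpa using ih (by simp) (fun x hx => ht x (List.mem_cons_of_mem a hx))

theorem pvCountLoopA_spec (cs₀ : List Char) (cnt₀ : Int) :
    pvCountLoopA cs₀ cnt₀ =
      if pvPartOk cs₀ then cnt₀ + (cs₀.countP pvDig : Int)
      else if cs₀ = [] then cnt₀ else 0 := by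
  suffices H : ∀ n (cs : List Char) (cnt : Int), cs.length = n →
      pvCountLoopA cs cnt =
        if pvPartOk cs then cnt + (cs.countP pvDig : Int)
        else if cs = [] then cnt else 0 from H cs₀.length cs₀ cnt₀ rfl
  intro n
  induction n using Nat.strong_induction_on with
  | _ n ih =>
  intro cs cnt hlen
  by_cases hne : cs = []
  · subst hne; simp [pvCountLoopA, pvPartOk]
  · rw [pvCountLoopA, if_neg hne]
    by_cases hte : (pvSpanLetters cs).1 = []
    · -- j == i : the first char of cs is not a letter
      obtain ⟨c, cs', rfl⟩ := List.exists_cons_of_ne_nil hne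
      have hrest : (pvSpanLetters (c :: cs')).2 = c :: cs' := by
        have := pvSpan_append (c :: cs'); rw [hte] at this; simpa using this
      have hnl : pvLetter c = false := pvSpan_head_not_letter _ c cs' hrest
      rw [if_pos hte]
      simp [pvPartOk_false_head c cs' hnl]
    · rw [if_neg hte]
      have hlt : ∀ a ∈ (pvSpanLetters cs).1, pvLetter a = true := pvSpan_letters cs
      by_cases hr : (pvSpanLetters cs).2 = []
      · -- j >= n : cs is all letters
        rw [dif_pos hr]
        have hall : ∀ a ∈ cs, pvLetter a = true := by
          intro a ha
          rw [← pvSpan_append cs, hr] at ha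
          exact hlt a (by simpa using ha)
        simp [pvPartOk_false_all_letters cs hall, hne]
      · rw [dif_neg hr]
        obtain ⟨c, rest', hrest⟩ := List.exists_cons_of_ne_nil hr
        have hdecomp : (pvSpanLetters cs).1 ++ c :: rest' = cs := by
          rw [← hrest]; exact pvSpan_append cs
        have hhead : (pvSpanLetters cs).2.head hr = c := by simp [hrest]
        have htail : (pvSpanLetters cs).2.tail = rest' := by simp [hrest]
        rw [hhead, htail]
        have hc0 : (pvSpanLetters cs).1.countP pvDig = 0 :=
          List.countP_eq_zero.mpr (fun a ha => by simp [pvLetter_not_dig a (hlt a ha)])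
        by_cases hc : c ∈ ['1', '2', '3', '4', '5']
        · have hdig : pvDig c = true := by
            have h2 := hc
            simp [pvDig]
            simpa using h2
          rw [if_pos hc]
          have hlen' : rest'.length < n := by
            have h1 := pvSpanLetters_snd_length_le cs
            rw [hrest] at h1
            simp at h1
            omega
          rw [ih rest'.length hlen' rest' (cnt + 1) rfl]
          rw [← hdecomp, pvPartOk_span_digit _ c rest' hte hlt hdig]
          cases rest' with
          | nil => simp [pvPartOk, hc0, List.countP_append, List.countP_cons, hdig]
          | cons d r =>
            simp only [List.isEmpty_cons, Bool.false_or]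
            cases hok : pvPartOk (d :: r) with
            | true =>
              simp [hok, List.countP_append, hc0, List.countP_cons, hdig]
              push_cast
              ring
            | false => simp [hok]
        · have hdig : pvDig c = false := by
            cases h : pvDig c with
            | false => rfl
            | true =>
              simp [pvDig] at h
              exact absurd (by simpa using h) hc
          have hnl : pvLetter c = false := pvSpan_head_not_letter cs c rest' hrest
          have hmem : c ∈ cs := by rw [← hdecomp]; simp
          rw [if_neg hc]
          simp [pvPartOk_false_of_bad cs c hmem hnl hdig, hne]

theorem pvCount_spec (p : List Char) :
    pvCountSyllablesConcat p = if pvPartOk p then (p.countP pvDig : Int) else 0 := by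
  unfold pvCountSyllablesConcat
  by_cases hne : p = []
  · subst hne; simp [pvPartOk]
  · rw [pvCountLoopA_spec]
    simp [hne]

theorem pvPartOk_count_pos (p : List Char) (h : pvPartOk p = true) :
    1 ≤ p.countP pvDig := by
  cases p with
  | nil => simp [pvPartOk] at h
  | cons c0 rest =>
    unfold pvPartOk at h
    simp only [Bool.and_eq_true] at h
    exact List.countP_pos_iff.mpr ⟨_, pvLast_mem rest c0, h.1.1.2⟩

theorem pvCollectA_spec (parts : List (List Char)) :
    pvCollectA parts =
      if parts.all pvPartOk then some (parts.map (fun p => (p.countP pvDig : Int)))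
      else none := by
  induction parts with
  | nil => simp [pvCollectA]
  | cons p ps ih =>
    simp only [pvCollectA, pvCount_spec, ih]
    cases hok : pvPartOk p with
    | false => simp [hok]
    | true =>
      have hpos := pvPartOk_count_pos p hok
      have hex : ∃ x ∈ p, pvDig x = true := List.countP_pos_iff.mp hpos
      cases hall : ps.all pvPartOk <;> simp [hok, hall, hex]

theorem pvGetD_zero_headD (l : List Int) : l.getD 0 0 = l.headD 0 := by
  cases l <;> simp

-- ===== VERDICT =====
theorem is_valid_agent_name_spec : Claim_equal_is_valid_agent_name := by
  intro name _
  unfold Spec_is_valid_agent_name is_valid_agent_name is_valid_agent_name_alt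
  cases hin : PySem.Chars.isIn ['_'] name.toList with
  | false => simp [hin]
  | true =>
    simp only [hin]
    rw [pvCollectA_spec]
    generalize PySem.Chars.splitOn name.toList ['_'] = parts
    by_cases hall : parts.all pvPartOk = true
    · have hne : parts.any (fun p => decide (p = [])) = false := by
        rw [List.any_eq_false]
        intro p hp
        have hok := List.all_eq_true.mp hall p hp
        simp only [decide_eq_true_eq]
        intro hpe
        rw [hpe] at hok
        simp [pvPartOk] at hok
      simp only [hall, if_true, hne, Bool.not_true, Bool.false_eq_true, if_false]
      rcases parts with - | ⟨p0, parts1⟩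
      · simp
      · rcases parts1 with - | ⟨p1, parts2⟩
        · simp only [List.map_cons, List.map_nil, List.sum_cons, List.sum_nil,
            List.length_cons, List.length_nil, pvGetD_zero_headD, List.headD_cons,
            List.getD_cons_zero, List.getD_cons_succ]
          split_ifs <;> symm <;>
            simp only [decide_eq_true_eq, decide_eq_false_iff_not] <;> omega
        · rcases parts2 with - | ⟨p2, parts3⟩
          · simp only [List.map_cons, List.map_nil, List.sum_cons, List.sum_nil,
              List.length_cons, List.length_nil, pvGetD_zero_headD, List.headD_cons,
              List.getD_cons_zero, List.getD_cons_succ]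
            split_ifs <;> symm <;>
              simp only [decide_eq_true_eq, decide_eq_false_iff_not] <;> omega
          · simp only [List.map_cons, List.sum_cons, List.length_cons, pvGetD_zero_headD,
              List.headD_cons, List.getD_cons_zero, List.getD_cons_succ]
            split_ifs <;> symm <;>
              simp only [decide_eq_true_eq, decide_eq_false_iff_not] <;> omega
    · have hallb : parts.all pvPartOk = false := by simpa using hall
      simp only [hallb, Bool.false_eq_true, if_false, Bool.not_false, if_true]
      cases hany : parts.any (fun p => decide (p = [])) <;> simp [hany]
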